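-- pv_equiv track=rewrite | github.com/swarui/phase-3-wk1-code-challenge-toy-problems | challenge3.py | calculate_consonant_values
-- ===== SOURCE A (Python) =====
-- alphabetic_number_position = {
--     "a": 1,
--     "b": 2,
--     "c": 3,
--     "d": 4,
--     "e": 5,
--     "f": 6,
--     "g": 7,
--     "h": 8,
--     "i": 9,
--     "j": 10,
--     "k": 11,
--     "l": 12,
--     "m": 13,
--     "n": 14,
--     "o": 15,
--     "p": 16,
--     "q": 17,
--     "r": 18,
--     "s": 19,
--     "t": 20,
--     "u": 21,
--     "v": 22,
--     "w": 23,
--     "x": 24,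
--     "y": 25,
--     "z": 26,
-- }
--
-- vowels = "aeiou"
--
-- def remove_vowels_from_string(lower_str):
--     # convert the input string to a list of characters
--     l_str_list = list(lower_str)
--
--     # reads through the characters, replacing vowels with spaces
--     for i, c in enumerate(l_str_list):
--         if c in vowels:
--             l_str_list[i] = " "
--
--     #join the characters back into a string
--     return "".join(l_str_list)
--
-- def calculate_consonant_values(l_str):
--     # Remove vowels from the input string
--     only_consonant_str = remove_vowels_from_string(l_str)
--
--     # Split the string into groups of consecutive consonants
--     constant_list_groups = only_consonant_str.split(" ")
--
--     # Create a list of lists, where each inner list contains the characters of a consonant group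
--     constant_list_of_char_list = [[c for c in s] for s in constant_list_groups]
--
--     # Calculated the sum of position values for each consonant group
--     summed_list_values_for_list_of_contants = [
--         sum([alphabetic_number_position[c] for c in l]) for l in constant_list_of_char_list if l != []
--     ]
--
--     return summed_list_values_for_list_of_contants
-- ===== SOURCE B (Python) =====
-- vowels = "aeiou"
--
-- def calculate_consonant_values(l_str):
--     # Two-pointer scan: skip boundaries (vowels/spaces); for each maximal
--     # run of other characters sum ord(c) - 96 (the letter's alphabet position).
--     sums = []
--     i, n = 0, len(l_str)
--     while i < n:
--         if l_str[i] in vowels or l_str[i] == " ":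
--             i += 1
--         else:
--             total = 0
--             while i < n and l_str[i] not in vowels and l_str[i] != " ":
--                 total += ord(l_str[i]) - 96
--                 i += 1
--             sums.append(total)
--     return sums
-- ===== Notes on version B (the rewrite author's own statement) =====
-- stated objective: alternative
-- what changed: Replaces the four-stage pipeline (vowel-to-space rewrite, join, split on space, build list-of-lists, map-sum each nonempty group) and its lookup dict with a single two-pointer scan that consumes each maximal consonant run in an inner loop, computing letter positions arithmetically as ord(c)-96.
import Mathlib
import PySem

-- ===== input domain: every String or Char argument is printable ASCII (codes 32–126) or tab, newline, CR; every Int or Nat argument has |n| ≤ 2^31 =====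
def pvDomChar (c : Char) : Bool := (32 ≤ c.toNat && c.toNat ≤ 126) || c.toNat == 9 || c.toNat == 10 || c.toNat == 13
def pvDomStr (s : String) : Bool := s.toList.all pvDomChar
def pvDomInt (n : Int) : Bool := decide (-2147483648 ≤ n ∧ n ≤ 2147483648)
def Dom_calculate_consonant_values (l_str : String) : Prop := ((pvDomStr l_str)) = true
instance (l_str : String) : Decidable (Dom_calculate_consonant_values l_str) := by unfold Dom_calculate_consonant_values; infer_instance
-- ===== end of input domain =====

-- B replaces A's staged pipeline (vowel→space rewrite, split, map-sum groups via the lookup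
-- dict) with a two-pointer scan that consumes each consonant run, valuing letters as ord(c)-96
-- (objective: alternative).

-- module-level constants of the Python module
def pvVowels : List Char := ['a', 'e', 'i', 'o', 'u']  -- vowels = "aeiou" (as its characters)
def alphabetic_number_position : PySem.Dict Char Int := PySem.Dict.ofList
  [('a', 1), ('b', 2), ('c', 3), ('d', 4), ('e', 5), ('f', 6), ('g', 7), ('h', 8), ('i', 9),
   ('j', 10), ('k', 11), ('l', 12), ('m', 13), ('n', 14), ('o', 15), ('p', 16), ('q', 17),
   ('r', 18), ('s', 19), ('t', 20), ('u', 21), ('v', 22), ('w', 23), ('x', 24), ('y', 25),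
   ('z', 26)]
-- alphabetic_number_position[c]; the KeyError case (missing key) is excluded by Pre_
def pvPos (c : Char) : Int := PySem.Dict.getD alphabetic_number_position c 0

-- ===== PORT A =====
def remove_vowels_from_string (lower_str : String) : String :=
  -- list(lower_str); replace vowels by " "; "".join
  String.ofList (lower_str.toList.map (fun c => if pvVowels.contains c then ' ' else c))

def calculate_consonant_values (l_str : String) : List Int :=
  let only_consonant_str := remove_vowels_from_string l_str
  -- only_consonant_str.split(" ") (nonempty sep: never raises)
  let constant_list_groups := PySem.Chars.splitOn only_consonant_str.toList [' ']
  -- [[c for c in s] for s in constant_list_groups]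
  let constant_list_of_char_list := constant_list_groups.map (fun s => s.map (fun c => c))
  (constant_list_of_char_list.filter (fun l => decide (l ≠ []))).map
    (fun l => (l.map pvPos).sum)

-- ===== PORT B =====
-- the two-pointer scan of Source B as structural mutual recursion over the character list:
-- pvRuns = the outer while loop (skipping boundaries), pvRun = the inner while loop
-- (accumulating ord(c) - 96 over one consonant run)
mutual
def pvRuns : List Char → List Int
  | [] => []
  | c :: rest =>
    if pvVowels.contains c || c == ' ' then pvRuns rest
    else pvRun ((c.toNat : Int) - 96) rest

def pvRun (total : Int) : List Char → List Int
  | [] => [total]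
  | c :: rest =>
    if pvVowels.contains c || c == ' ' then total :: pvRuns rest
    else pvRun (total + ((c.toNat : Int) - 96)) rest
end

def calculate_consonant_values_alt (l_str : String) : List Int := pvRuns l_str.toList

-- ===== PRECONDITION & SPEC =====
-- Pre_ excludes exactly the inputs on which Python A raises KeyError: a character
-- that is neither a lowercase ASCII letter nor a space.
def Pre_calculate_consonant_values (l_str : String) : Prop :=
  -- every char is a lowercase ASCII letter (97..122) or a space (32)
  (l_str.toList.all fun c => (97 ≤ c.toNat && c.toNat ≤ 122) || c.toNat == 32) = true
instance (l_str : String) : Decidable (Pre_calculate_consonant_values l_str) := by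
  unfold Pre_calculate_consonant_values; infer_instance
def pvWitness_calculate_consonant_values : String := "hello world"

def Spec_calculate_consonant_values (l_str : String) (out : List Int) : Prop := out = calculate_consonant_values_alt l_str
instance (l_str : String) (out : List Int) : Decidable (Spec_calculate_consonant_values l_str out) := by unfold Spec_calculate_consonant_values; infer_instance

-- ===== CLAIM (what is proved, stated in full; the proofs are below) =====
def Claim_equal_calculate_consonant_values : Prop := ∀ (l_str : String), Dom_calculate_consonant_values l_str → Pre_calculate_consonant_values l_str → Spec_calculate_consonant_values l_str (calculate_consonant_values l_str)

-- ===== LEMMAS AND PROOFS =====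

-- vowel→space replacement on a single character
def pvRepl (c : Char) : Char := if pvVowels.contains c then ' ' else c

-- structural spec of split-on-space: (first group, remaining groups)
def pvSplit : List Char → List Char × List (List Char)
  | [] => ([], [])
  | c :: rest =>
    let p := pvSplit rest
    if c = ' ' then ([], p.1 :: p.2) else (c :: p.1, p.2)

theorem pvSplitOn_go_eq (l : List Char) : ∀ (fuel : Nat), l.length ≤ fuel →
    ∀ (cur : List Char) (acc : List (List Char)),
    PySem.Chars.splitOn.go [' '] fuel l cur acc
      = acc.reverse ++ (cur.reverse ++ (pvSplit l).1) :: (pvSplit l).2 := by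
  induction l with
  | nil =>
    intro fuel _ cur acc
    cases fuel <;> simp [PySem.Chars.splitOn.go, pvSplit]
  | cons c rest ih =>
    intro fuel hf cur acc
    cases fuel with
    | zero => simp at hf
    | succ f =>
      have hf' : rest.length ≤ f := by simpa using hf
      by_cases hc : c = ' '
      · subst hc
        simp [PySem.Chars.splitOn.go, List.isPrefixOf, ih f hf', pvSplit]
      · simp [PySem.Chars.splitOn.go, List.isPrefixOf, hc, Ne.symm hc, ih f hf', pvSplit]

theorem pvSplitOn_eq (l : List Char) :
    PySem.Chars.splitOn l [' '] = (pvSplit l).1 :: (pvSplit l).2 := by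
  simpa using pvSplitOn_go_eq l (l.length + 1) (by omega) [] []

-- B's boundary test agrees with "the replaced character is a space"
theorem pvBoundary (c : Char) :
    (pvVowels.contains c || c == ' ') = true ↔ pvRepl c = ' ' := by
  by_cases h : c ∈ pvVowels
  · simp [pvRepl, h]
  · simp [pvRepl, h]

-- on lowercase letters the dict lookup is the arithmetic position
theorem pvPos_eq_arith_n (n : Nat) (h1 : 97 ≤ n) (h2 : n ≤ 122) :
    ∀ c : Char, c.toNat = n → pvPos c = (n : Int) - 96 := by
  interval_cases n <;>
    (intro c hc;
     have hce : c = Char.ofNat c.toNat := (Char.ofNat_toNat c).symm;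
     rw [hce, hc]; decide)

theorem pvPos_eq_arith (c : Char) (h1 : 97 ≤ c.toNat) (h2 : c.toNat ≤ 122) :
    pvPos c = (c.toNat : Int) - 96 := pvPos_eq_arith_n c.toNat h1 h2 c rfl

-- Pre_'s per-character condition
def pvOk (c : Char) : Bool := ((97 ≤ c.toNat && c.toNat ≤ 122) || c.toNat == 32)

theorem pvOk_not_boundary (c : Char) (hc : pvOk c = true)
    (hb : ¬ (pvVowels.contains c || c == ' ') = true) :
    97 ≤ c.toNat ∧ c.toNat ≤ 122 := by
  simp only [pvOk, Bool.or_eq_true, Bool.and_eq_true, beq_iff_eq, decide_eq_true_eq] at hc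
  rcases hc with h | h
  · exact h
  · exfalso
    apply hb
    have hce : c = Char.ofNat c.toNat := (Char.ofNat_toNat c).symm
    rw [h] at hce
    have hsp : c = ' ' := by rw [hce]
    simp [hsp]

-- the two-pointer scan computes exactly the per-group sums of the split
theorem pvRuns_inv (l : List Char) (hok : ∀ c ∈ l, pvOk c = true) :
    (pvRuns l
      = (if ((pvSplit (l.map pvRepl)).1 ≠ []) then
            [((pvSplit (l.map pvRepl)).1.map pvPos).sum] else [])
        ++ ((pvSplit (l.map pvRepl)).2.filter (fun g => decide (g ≠ []))).map
            (fun g => (g.map pvPos).sum))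
    ∧ (∀ total : Int,
        pvRun total l
          = (total + ((pvSplit (l.map pvRepl)).1.map pvPos).sum)
            :: ((pvSplit (l.map pvRepl)).2.filter (fun g => decide (g ≠ []))).map
                (fun g => (g.map pvPos).sum)) := by
  induction l with
  | nil => exact ⟨by simp [pvRuns, pvSplit], fun total => by simp [pvRun, pvSplit]⟩
  | cons c rest ih =>
    have hokc : pvOk c = true := hok c (by simp)
    have hokr : ∀ x ∈ rest, pvOk x = true := fun x hx => hok x (by simp [hx])
    obtain ⟨ihP, ihQ⟩ := ih hokr
    by_cases hb : (pvVowels.contains c || c == ' ') = true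
    · have hr : pvRepl c = ' ' := (pvBoundary c).mp hb
      constructor
      · simp only [pvRuns, hb, if_true, List.map_cons, hr, pvSplit]
        rw [ihP]
        by_cases h1 : (pvSplit (rest.map pvRepl)).1 = [] <;> simp [h1]
      · intro total
        simp only [pvRun, hb, if_true, List.map_cons, hr, pvSplit]
        rw [ihP]
        by_cases h1 : (pvSplit (rest.map pvRepl)).1 = [] <;> simp [h1]
    · have hr : ¬ pvRepl c = ' ' := fun h => hb ((pvBoundary c).mpr h)
      have hnc : c ∉ pvVowels := by
        intro hmem; exact hb (by simp [hmem])
      have hcc : pvRepl c = c := by simp [pvRepl, hnc]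
      have hcs : ¬ c = ' ' := fun h => hr (hcc.trans h)
      obtain ⟨h1, h2⟩ := pvOk_not_boundary c hokc hb
      have hv : pvPos c = (c.toNat : Int) - 96 := pvPos_eq_arith c h1 h2
      constructor
      · simp only [pvRuns, hb, List.map_cons, hcc, pvSplit, if_neg hcs]
        rw [ihQ]
        simp [hv]
      · intro total
        simp only [pvRun, hb, List.map_cons, hcc, pvSplit, if_neg hcs]
        rw [ihQ]
        simp [hv, add_assoc]

-- ===== VERDICT (by name: the statement is the Claim_ definition above) =====
theorem calculate_consonant_values_spec : Claim_equal_calculate_consonant_values := by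
  intro l_str _ hpre
  unfold Spec_calculate_consonant_values calculate_consonant_values
    calculate_consonant_values_alt remove_vowels_from_string
  have hok : ∀ c ∈ l_str.toList, pvOk c = true := by
    intro c hc
    exact List.all_eq_true.mp hpre c hc
  rw [(pvRuns_inv l_str.toList hok).1,
    show (fun c => if pvVowels.contains c then ' ' else c) = pvRepl from rfl]
  simp only [String.toList_ofList]
  rw [pvSplitOn_eq]
  by_cases h1 : (pvSplit (l_str.toList.map pvRepl)).1 = [] <;>
    simp [h1]
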